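-- pv_equiv track=rewrite | github.com/akshaykoregaonkar/aoc2025 | day10/solution.py | _shortest_light_sequence
-- ===== SOURCE A (Python) =====
-- from collections import deque
--
-- def _get_mask(buttons):
--     mask = 0
--     for i in buttons:
--         mask |= 1 << i
--     return mask
--
-- def _shortest_light_sequence(expected_lights, buttons):
--     start_lights = [0] * len(expected_lights)
--
--     start_mask = _get_mask([i for i, v in enumerate(start_lights) if v == 1])
--     goal_mask  = _get_mask([i for i, v in enumerate(expected_lights) if v == 1])
--
--     button_masks = [_get_mask(b) for b in buttons]
--
--     queue = deque([(start_mask, [])])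
--     visited = {start_mask}
--
--     while queue:
--         state, path = queue.popleft()
--
--         if state == goal_mask:
--             return path
--
--         for i, b_mask in enumerate(button_masks):
--             next_state = state ^ b_mask
--             if next_state not in visited:
--                 visited.add(next_state)
--                 queue.append((next_state, path + [i]))
--
--     return None
-- ===== SOURCE B (Python) =====
-- from collections import deque
--
-- def _shortest_light_sequence(expected_lights, buttons):
--     goal_mask = 0
--     for i, v in enumerate(expected_lights):
--         if v == 1:
--             goal_mask |= 1 << i
--
--     button_masks = []
--     for b in buttons:
--         m = 0
--         for j in b:
--             m |= 1 << j
--         button_masks.append(m)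
--
--     start = 0
--     parent = {start: None}   # state -> (previous state, button index) or None for start
--     queue = deque([start])
--
--     while queue:
--         state = queue.popleft()
--
--         if state == goal_mask:
--             seq = []
--             cur = state
--             while parent[cur] is not None:
--                 prev, idx = parent[cur]
--                 seq.append(idx)
--                 cur = prev
--             seq.reverse()
--             return seq
--
--         for i, b_mask in enumerate(button_masks):
--             nxt = state ^ b_mask
--             if nxt not in parent:
--                 parent[nxt] = (state, i)
--                 queue.append(nxt)
--
--     return None
-- ===== Notes on version B (the rewrite author's own statement) =====
-- stated objective: alternative
-- what changed: B's BFS queue stores bare states with a parent-pointer dict (state -> (previous state, button index)) and reconstructs the answer once by walking parents and reversing, instead of copying a full path list into every queue entry as A does.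
import Mathlib
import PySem

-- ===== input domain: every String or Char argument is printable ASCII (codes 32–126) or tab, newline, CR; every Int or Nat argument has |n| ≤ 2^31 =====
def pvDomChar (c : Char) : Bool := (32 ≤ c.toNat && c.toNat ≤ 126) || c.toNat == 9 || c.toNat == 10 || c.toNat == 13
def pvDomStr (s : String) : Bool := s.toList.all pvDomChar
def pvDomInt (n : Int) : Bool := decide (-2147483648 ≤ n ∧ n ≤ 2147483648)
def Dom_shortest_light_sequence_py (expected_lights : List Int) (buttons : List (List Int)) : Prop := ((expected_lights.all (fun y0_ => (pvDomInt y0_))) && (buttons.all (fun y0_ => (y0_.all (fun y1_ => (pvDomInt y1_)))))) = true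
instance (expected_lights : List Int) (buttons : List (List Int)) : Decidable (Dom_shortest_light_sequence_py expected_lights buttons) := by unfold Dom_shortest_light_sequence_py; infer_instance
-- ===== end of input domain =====

-- B replaces A's path-per-queue-entry BFS by a parent-pointer BFS with path reconstruction (alternative data structure, same BFS order).

-- ===== PORT A =====
-- _get_mask: mask |= 1 << i.  Exact for the nonnegative indices Pre_ admits (Python raises ValueError on a negative shift).
def pvGetMask (l : List Int) : Nat :=
  l.foldl (fun m i => m ||| (1 <<< i.toNat)) 0

-- the while-loop of A; fuel is a totality guard only (a BFS over XOR states pops at most 2^|buttons| entries)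
def pvBfsA (goal : Nat) (bms : List (Int × Nat)) : Nat → List (Nat × List Int) → PySem.Set Nat → Option (List Int)
  | 0, _, _ => none
  | _+1, [], _ => none
  | fuel+1, (state, path) :: rest, visited =>
    if state = goal then some path
    else
      let st := bms.foldl
        (fun (acc : List (Nat × List Int) × PySem.Set Nat) ib =>
          let ns := state ^^^ ib.2
          if PySem.Set.contains acc.2 ns then acc
          else (acc.1 ++ [(ns, path ++ [ib.1])], PySem.Set.add acc.2 ns))
        (rest, visited)
      pvBfsA goal bms fuel st.1 st.2

def shortest_light_sequence_py (expected_lights : List Int) (buttons : List (List Int)) : Option (List Int) :=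
  let start_lights : List Int := List.replicate expected_lights.length 0
  let start_mask := pvGetMask (((PySem.List.enumerate start_lights).filter (fun iv => iv.2 == 1)).map (·.1))
  let goal_mask := pvGetMask (((PySem.List.enumerate expected_lights).filter (fun iv => iv.2 == 1)).map (·.1))
  let button_masks := buttons.map pvGetMask
  pvBfsA goal_mask (PySem.List.enumerate button_masks) (2 ^ button_masks.length + 1) [(start_mask, [])] (PySem.Set.ofList [start_mask])

-- ===== PORT B =====
def pvAltGoalMask (expected : List Int) : Nat :=
  (PySem.List.enumerate expected).foldl (fun (g : Nat) (iv : Int × Int) => if iv.2 == 1 then g ||| (1 <<< iv.1.toNat) else g) 0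

def pvAltButtonMasks (buttons : List (List Int)) : List Nat :=
  buttons.foldl (fun acc b => acc ++ [b.foldl (fun m j => m ||| (1 <<< j.toNat)) 0]) []

-- the reconstruction while-loop of B (walk parent pointers, appending button indices); fuel is a totality guard only
def pvRebuild (parent : PySem.Dict Nat (Option (Nat × Int))) : Nat → Nat → List Int → List Int
  | 0, _, seq => seq
  | f+1, cur, seq =>
    match parent.get? cur with
    | some (some pi) => pvRebuild parent f pi.1 (seq ++ [pi.2])
    | _ => seq

-- the while-loop of B: queue of bare states + parent dict
def pvBfsB (goal : Nat) (bms : List (Int × Nat)) : Nat → List Nat → PySem.Dict Nat (Option (Nat × Int)) → Option (List Int)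
  | 0, _, _ => none
  | _+1, [], _ => none
  | fuel+1, state :: rest, parent =>
    if state = goal then some ((pvRebuild parent parent.size state []).reverse)
    else
      let st := bms.foldl
        (fun (acc : List Nat × PySem.Dict Nat (Option (Nat × Int))) ib =>
          let ns := state ^^^ ib.2
          if acc.2.contains ns then acc
          else (acc.1 ++ [ns], acc.2.insert ns (some (state, ib.1))))
        (rest, parent)
      pvBfsB goal bms fuel st.1 st.2

def shortest_light_sequence_py_alt (expected_lights : List Int) (buttons : List (List Int)) : Option (List Int) :=
  let goal_mask := pvAltGoalMask expected_lights
  let button_masks := pvAltButtonMasks buttons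
  pvBfsB goal_mask (PySem.List.enumerate button_masks) (2 ^ button_masks.length + 1) [0]
    (PySem.Dict.insert PySem.Dict.empty 0 none)

-- ===== PRECONDITION & SPEC =====
-- Pre_ excludes a negative entry in some button, on which Python's `1 << i` raises ValueError (in both A and B).
def Pre_shortest_light_sequence_py (expected_lights : List Int) (buttons : List (List Int)) : Prop :=
  ∀ b ∈ buttons, ∀ i ∈ b, 0 ≤ i

instance (expected_lights : List Int) (buttons : List (List Int)) : Decidable (Pre_shortest_light_sequence_py expected_lights buttons) := by unfold Pre_shortest_light_sequence_py; infer_instance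

def pvWitness_shortest_light_sequence_py : List Int × List (List Int) := ([1, 0], [[0], [1]])

def Spec_shortest_light_sequence_py (expected_lights : List Int) (buttons : List (List Int)) (out : Option (List Int)) : Prop := out = shortest_light_sequence_py_alt expected_lights buttons
instance (expected_lights : List Int) (buttons : List (List Int)) (out : Option (List Int)) : Decidable (Spec_shortest_light_sequence_py expected_lights buttons out) := by unfold Spec_shortest_light_sequence_py; infer_instance

-- ===== CLAIM (what is proved, stated in full; the proofs are below) =====
def Claim_equal_shortest_light_sequence_py : Prop := ∀ (expected_lights : List Int) (buttons : List (List Int)), Dom_shortest_light_sequence_py expected_lights buttons → Pre_shortest_light_sequence_py expected_lights buttons → Spec_shortest_light_sequence_py expected_lights buttons (shortest_light_sequence_py expected_lights buttons)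

-- ===== LEMMAS AND PROOFS =====

-- "the parent dict reaches state s from the start through button indices p"
inductive PvReach (d : PySem.Dict Nat (Option (Nat × Int))) : Nat → List Int → Prop
  | start (s : Nat) : d.get? s = some none → PvReach d s []
  | step (s t : Nat) (i : Int) (p : List Int) :
      d.get? s = some (some (t, i)) → PvReach d t p → PvReach d s (p ++ [i])

theorem pvReach_rebuild {d : PySem.Dict Nat (Option (Nat × Int))} {s : Nat} {p : List Int}
    (h : PvReach d s p) : ∀ f, p.length ≤ f → ∀ acc, pvRebuild d f s acc = acc ++ p.reverse := by
  induction h with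
  | start s hs =>
    intro f _ acc
    cases f with
    | zero => simp [pvRebuild]
    | succ f => simp [pvRebuild, hs]
  | step s t i p hs _ ih =>
    intro f hf acc
    cases f with
    | zero => simp at hf
    | succ f =>
      simp only [pvRebuild, hs]
      rw [ih f (by simpa using hf)]
      simp

theorem pvReach_insert {d : PySem.Dict Nat (Option (Nat × Int))} {s : Nat} {p : List Int}
    {k : Nat} {v : Option (Nat × Int)} (hk : d.get? k = none) (h : PvReach d s p) :
    PvReach (d.insert k v) s p := by
  induction h with
  | start s hs =>
    exact PvReach.start s (by rw [PySem.Dict.get?_insert_of_ne _ _ (fun he => by simp [he, hk] at hs)]; exact hs)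
  | step s t i p hs _ ih =>
    exact PvReach.step s t i p (by rw [PySem.Dict.get?_insert_of_ne _ _ (fun he => by simp [he, hk] at hs)]; exact hs) ih

theorem pv_fold_inv (state : Nat) (path : List Int) :
    ∀ (bms : List (Int × Nat)) (restA : List (Nat × List Int)) (visited : PySem.Set Nat)
      (d : PySem.Dict Nat (Option (Nat × Int))),
    (∀ x : Nat, PySem.Set.contains visited x = d.contains x) →
    (∀ sp ∈ restA, PvReach d sp.1 sp.2 ∧ sp.2.length < d.size) →
    PvReach d state path → path.length < d.size →
    (let rA := bms.foldl
        (fun (acc : List (Nat × List Int) × PySem.Set Nat) ib =>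
          let ns := state ^^^ ib.2
          if PySem.Set.contains acc.2 ns then acc
          else (acc.1 ++ [(ns, path ++ [ib.1])], PySem.Set.add acc.2 ns))
        (restA, visited)
     let rB := bms.foldl
        (fun (acc : List Nat × PySem.Dict Nat (Option (Nat × Int))) ib =>
          let ns := state ^^^ ib.2
          if acc.2.contains ns then acc
          else (acc.1 ++ [ns], acc.2.insert ns (some (state, ib.1))))
        (restA.map Prod.fst, d)
     rA.1.map Prod.fst = rB.1 ∧ (∀ x : Nat, PySem.Set.contains rA.2 x = rB.2.contains x) ∧
       (∀ sp ∈ rA.1, PvReach rB.2 sp.1 sp.2 ∧ sp.2.length < rB.2.size)) := by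
  intro bms
  induction bms with
  | nil =>
    intro restA visited d hvis hq hp hl
    exact ⟨rfl, hvis, hq⟩
  | cons ib bms ih =>
    intro restA visited d hvis hq hp hl
    simp only [List.foldl_cons, hvis]
    cases hc : d.contains (state ^^^ ib.2) with
    | true =>
      exact ih restA visited d hvis hq hp hl
    | false =>
      simp only [Bool.false_eq_true, if_false]
      have hget : d.get? (state ^^^ ib.2) = none :=
        (PySem.Dict.get?_eq_none_iff_contains d _).mpr hc
      have hcontv : PySem.Set.contains visited (state ^^^ ib.2) = false := (hvis _).trans hc
      have hadd : PySem.Set.add visited (state ^^^ ib.2) = visited ++ [state ^^^ ib.2] := by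
        simp only [PySem.Set.add, hcontv, Bool.false_eq_true, if_false]
      have hmap : restA.map Prod.fst ++ [state ^^^ ib.2]
          = (restA ++ [(state ^^^ ib.2, path ++ [ib.1])]).map Prod.fst := by simp
      rw [hmap]
      have hsize : (d.insert (state ^^^ ib.2) (some (state, ib.1))).size = d.size + 1 := by
        rw [PySem.Dict.size_insert, if_neg (by simp [hc])]
      refine ih _ _ _ ?_ ?_ (pvReach_insert hget hp) (by omega)
      · intro x
        rw [hadd]
        simp [PySem.Set.contains, PySem.Dict.contains_insert, ← hvis x, Bool.or_comm,
          beq_eq_decide]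
      · intro sp hsp
        rcases List.mem_append.mp hsp with hsp | hsp
        · have h := hq sp hsp
          exact ⟨pvReach_insert hget h.1, by omega⟩
        · simp only [List.mem_singleton] at hsp
          subst hsp
          refine ⟨PvReach.step _ state ib.1 path (PySem.Dict.get?_insert_self d _ _)
            (pvReach_insert hget hp), ?_⟩
          simp only [List.length_append, List.length_singleton]
          omega

theorem pv_bfs_eq (goal : Nat) (bms : List (Int × Nat)) :
    ∀ (fuel : Nat) (qA : List (Nat × List Int)) (visited : PySem.Set Nat)
      (d : PySem.Dict Nat (Option (Nat × Int))),
    (∀ x : Nat, PySem.Set.contains visited x = d.contains x) →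
    (∀ sp ∈ qA, PvReach d sp.1 sp.2 ∧ sp.2.length < d.size) →
    pvBfsA goal bms fuel qA visited = pvBfsB goal bms fuel (qA.map Prod.fst) d := by
  intro fuel
  induction fuel with
  | zero => intro qA visited d _ _; rfl
  | succ fuel ih =>
    intro qA visited d hvis hq
    match qA with
    | [] => rfl
    | (state, path) :: rest =>
      obtain ⟨hr, hlen⟩ := hq (state, path) List.mem_cons_self
      simp only [List.map_cons, pvBfsA, pvBfsB]
      by_cases hg : state = goal
      · rw [if_pos hg, if_pos hg,
          pvReach_rebuild hr d.size (Nat.le_of_lt hlen) [], List.nil_append,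
          List.reverse_reverse]
      · rw [if_neg hg, if_neg hg]
        have hfold := pv_fold_inv state path bms rest visited d hvis
          (fun sp hsp => hq sp (List.mem_cons_of_mem _ hsp)) hr hlen
        obtain ⟨h1, h2, h3⟩ := hfold
        rw [← h1]
        exact ih _ _ _ h2 h3

-- ===== VERDICT (by name: the statement is the Claim_ definition above) =====
theorem shortest_light_sequence_py_spec : Claim_equal_shortest_light_sequence_py := by
  intro expected_lights buttons _ _
  unfold Spec_shortest_light_sequence_py
  simp only [shortest_light_sequence_py, shortest_light_sequence_py_alt]
  have h0 : ((PySem.List.enumerate (List.replicate expected_lights.length (0 : Int))).filter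
      (fun iv => iv.2 == 1)) = [] := by
    rw [List.filter_eq_nil_iff]
    intro iv hiv
    obtain ⟨k, hk, hiv⟩ := (PySem.List.mem_enumerate_iff _ _ _).mp hiv
    subst hiv
    simp
  have hgoal : pvGetMask (((PySem.List.enumerate expected_lights).filter
      (fun iv => iv.2 == 1)).map (·.1)) = pvAltGoalMask expected_lights := by
    unfold pvGetMask pvAltGoalMask
    rw [List.foldl_map, PySem.List.foldl_if_eq_foldl_filter]
  have hbm : pvAltButtonMasks buttons = buttons.map pvGetMask := by
    unfold pvAltButtonMasks pvGetMask
    rw [PySem.List.foldl_append_singleton_eq_map, List.nil_append]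
  rw [h0, hgoal, hbm]
  have hstart : pvGetMask (List.map (fun (x : Int × Int) => x.1) []) = 0 := rfl
  rw [hstart]
  exact pv_bfs_eq (pvAltGoalMask expected_lights)
    (PySem.List.enumerate (buttons.map pvGetMask)) (2 ^ (buttons.map pvGetMask).length + 1)
    [(0, [])] (PySem.Set.ofList [0]) (PySem.Dict.insert PySem.Dict.empty 0 none)
    (fun (x : Nat) => by
      simp [PySem.Set.ofList, PySem.Set.add, PySem.Set.empty, PySem.Set.contains,
        PySem.Dict.contains_insert, PySem.Dict.contains_empty, beq_eq_decide])
    (fun sp hsp => by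
      simp only [List.mem_singleton] at hsp
      subst hsp
      exact ⟨PvReach.start 0 (PySem.Dict.get?_insert_self _ _ _), by decide⟩)
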